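-- pv_equiv track=rewrite | github.com/oberonia78/DSWX-SAR | src/dswx_sar/dswx_runconfig.py | check_polarizations
-- ===== SOURCE A (Python) =====
-- def check_polarizations(pol_list):
--     """Sort polarizations so that co-pols are preceded.
--     Parameters
--     ----------
--     pol_list : list
--         List of polarizations.
--     """
--     co_pol_list = []
--     cross_pol_list = []
--     def custom_sort(pol):
--         if pol in ['VV', 'HH']:
--             return (0, pol)  # Sort 'VV' and 'HH' before others
--         return (1, pol)
--
--     pol_list = sorted(pol_list, key=custom_sort)
--
--     for pol in pol_list:
--         if pol in ['VV', 'HH']: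
--             co_pol_list.append(pol)
--         else:
--             cross_pol_list.append(pol)
--
--     return co_pol_list, cross_pol_list, pol_list
-- ===== SOURCE B (Python) =====
-- def check_polarizations(pol_list):
--     co = sorted(p for p in pol_list if p in ('VV', 'HH'))
--     cross = sorted(p for p in pol_list if p not in ('VV', 'HH'))
--     return co, cross, co + cross
-- ===== Notes on version B (the rewrite author's own statement) =====
-- stated objective: simpler
-- what changed: B partitions first and sorts each part with plain string comparisons instead of A's sort-with-tuple-key followed by a partition loop; the third result is co + cross.
import Mathlib
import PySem

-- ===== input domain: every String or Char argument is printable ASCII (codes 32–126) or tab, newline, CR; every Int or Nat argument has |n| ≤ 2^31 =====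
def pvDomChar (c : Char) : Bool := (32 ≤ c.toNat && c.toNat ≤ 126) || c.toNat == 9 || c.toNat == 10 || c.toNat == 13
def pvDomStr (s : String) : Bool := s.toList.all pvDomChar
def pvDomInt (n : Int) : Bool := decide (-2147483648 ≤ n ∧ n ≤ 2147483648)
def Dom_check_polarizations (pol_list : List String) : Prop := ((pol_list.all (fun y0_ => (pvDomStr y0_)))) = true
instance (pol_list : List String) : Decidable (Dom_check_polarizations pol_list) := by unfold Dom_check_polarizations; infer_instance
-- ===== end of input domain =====

-- B replaces A's sort-with-tuple-key-then-partition by partition-then-sort-each-part (simpler decomposition, same results).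

-- ===== PORT A =====
-- 'pol in ['VV', 'HH']' (used by A's key and its partition loop, and by B's filters)
def pvIsCo (pol : String) : Bool := pol == "VV" || pol == "HH"

def check_polarizations (pol_list : List String) : List String × List String × List String :=
  -- pol_list = sorted(pol_list, key=custom_sort), custom_sort pol = (0, pol) if co else (1, pol)
  let sortedList := PySem.List.sorted2 pol_list (fun pol => if pvIsCo pol then (0 : Int) else 1) (fun pol => pol)
  -- for pol in pol_list: append to co_pol_list or cross_pol_list
  let acc := sortedList.foldl
    (fun acc pol => if pvIsCo pol then (acc.1 ++ [pol], acc.2) else (acc.1, acc.2 ++ [pol])) ([], [])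
  (acc.1, acc.2, sortedList)

-- ===== PORT B =====
def check_polarizations_alt (pol_list : List String) : List String × List String × List String :=
  let co := PySem.List.sorted (pol_list.filter pvIsCo) (fun x => x)
  let cross := PySem.List.sorted (pol_list.filter (fun x => !pvIsCo x)) (fun x => x)
  (co, cross, co ++ cross)

-- ===== PRECONDITION & SPEC =====
def Spec_check_polarizations (pol_list : List String) (out : List String × List String × List String) : Prop := out = check_polarizations_alt pol_list
instance (pol_list : List String) (out : List String × List String × List String) : Decidable (Spec_check_polarizations pol_list out) := by unfold Spec_check_polarizations; infer_instance

-- ===== CLAIM (what is proved, stated in full; the proofs are below) =====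
def Claim_equal_check_polarizations : Prop := ∀ (pol_list : List String), Dom_check_polarizations pol_list → Spec_check_polarizations pol_list (check_polarizations pol_list)

-- ===== LEMMAS AND PROOFS =====

-- A's tuple-key comparison, as sorted2 builds it
def pvLtB (a b : String) : Bool :=
  decide ((if pvIsCo a then (0 : Int) else 1) < (if pvIsCo b then (0 : Int) else 1)) ||
    (!decide ((if pvIsCo b then (0 : Int) else 1) < (if pvIsCo a then (0 : Int) else 1)) && decide (a < b))

-- plain string comparison, as sorted (key=identity) builds it
def pvStrB (a b : String) : Bool := decide (a < b)

lemma pvLtB_co_co {a b : String} (ha : pvIsCo a = true) (hb : pvIsCo b = true) :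
    pvLtB a b = pvStrB a b := by simp [pvLtB, pvStrB, ha, hb]

lemma pvLtB_cross_cross {a b : String} (ha : pvIsCo a = false) (hb : pvIsCo b = false) :
    pvLtB a b = pvStrB a b := by simp [pvLtB, pvStrB, ha, hb]

lemma pvLtB_co_cross {a b : String} (ha : pvIsCo a = true) (hb : pvIsCo b = false) :
    pvLtB a b = true := by simp [pvLtB, ha, hb]

lemma pvLtB_cross_co {a b : String} (ha : pvIsCo a = false) (hb : pvIsCo b = true) :
    pvLtB a b = false := by simp [pvLtB, ha, hb]

-- inserting a co-pol into (co ++ cross) inserts it within the co part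
lemma insert_co (x : String) (co cross : List String) (hx : pvIsCo x = true)
    (hco : ∀ y ∈ co, pvIsCo y = true) (hcr : ∀ y ∈ cross, pvIsCo y = false) :
    PySem.List.insertBy pvLtB x (co ++ cross) = PySem.List.insertBy pvStrB x co ++ cross := by
  induction co with
  | nil =>
    cases cross with
    | nil => simp [PySem.List.insertBy]
    | cons y ys =>
      have hy : pvIsCo y = false := hcr y (by simp)
      simp [PySem.List.insertBy, pvLtB_co_cross hx hy]
  | cons y co ih =>
    have hy : pvIsCo y = true := hco y (by simp)
    have h := pvLtB_co_co hx hy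
    by_cases hlt : pvStrB x y = true
    · simp [PySem.List.insertBy, h, hlt]
    · simp only [Bool.not_eq_true] at hlt
      simp [PySem.List.insertBy, h, hlt,
        ih (fun z hz => hco z (by simp [hz]))]

-- inserting a cross-pol into (co ++ cross) inserts it within the cross part
lemma insert_cross (x : String) (co cross : List String) (hx : pvIsCo x = false)
    (hco : ∀ y ∈ co, pvIsCo y = true) (hcr : ∀ y ∈ cross, pvIsCo y = false) :
    PySem.List.insertBy pvLtB x (co ++ cross) = co ++ PySem.List.insertBy pvStrB x cross := by
  induction co with
  | nil =>
    simp only [List.nil_append]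
    induction cross with
    | nil => simp [PySem.List.insertBy]
    | cons y ys ih =>
      have hy : pvIsCo y = false := hcr y (by simp)
      have h := pvLtB_cross_cross hx hy
      by_cases hlt : pvStrB x y = true
      · simp [PySem.List.insertBy, h, hlt]
      · simp only [Bool.not_eq_true] at hlt
        simp [PySem.List.insertBy, h, hlt, ih (fun z hz => hcr z (by simp [hz]))]
  | cons y co ih =>
    have hy : pvIsCo y = true := hco y (by simp)
    simp [PySem.List.insertBy, pvLtB_cross_co hx hy,
      ih (fun z hz => hco z (by simp [hz]))]

-- the insertion-sort fold under A's tuple key splits into two plain-key folds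
lemma fold_split : ∀ (xs co cross : List String),
    (∀ y ∈ co, pvIsCo y = true) → (∀ y ∈ cross, pvIsCo y = false) →
    xs.foldl (fun acc x => PySem.List.insertBy pvLtB x acc) (co ++ cross)
      = (xs.filter pvIsCo).foldl (fun acc x => PySem.List.insertBy pvStrB x acc) co
        ++ (xs.filter (fun x => !pvIsCo x)).foldl (fun acc x => PySem.List.insertBy pvStrB x acc) cross := by
  intro xs
  induction xs with
  | nil => intro co cross _ _; simp
  | cons x xs ih =>
    intro co cross hco hcr
    by_cases hx : pvIsCo x = true
    · have hco' : ∀ y ∈ PySem.List.insertBy pvStrB x co, pvIsCo y = true := by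
        intro y hy
        rcases (PySem.List.mem_insertBy _ _ _ _).mp hy with h | h
        · exact h ▸ hx
        · exact hco y h
      simp only [List.foldl_cons, List.filter_cons, hx, Bool.not_true, if_true]
      rw [insert_co x co cross hx hco hcr]
      simpa using ih (PySem.List.insertBy pvStrB x co) cross hco' hcr
    · simp only [Bool.not_eq_true] at hx
      have hcr' : ∀ y ∈ PySem.List.insertBy pvStrB x cross, pvIsCo y = false := by
        intro y hy
        rcases (PySem.List.mem_insertBy _ _ _ _).mp hy with h | h
        · exact h ▸ hx
        · exact hcr y h
      simp only [List.foldl_cons, List.filter_cons, hx, Bool.not_false]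
      rw [insert_cross x co cross hx hco hcr]
      simpa using ih co (PySem.List.insertBy pvStrB x cross) hco hcr'

-- A's sorted output is B's two sorted partitions, concatenated
lemma sorted2_eq_split (xs : List String) :
    PySem.List.sorted2 xs (fun pol => if pvIsCo pol then (0 : Int) else 1) (fun pol => pol)
      = PySem.List.sorted (xs.filter pvIsCo) (fun x => x)
        ++ PySem.List.sorted (xs.filter (fun x => !pvIsCo x)) (fun x => x) := by
  have ha : PySem.List.sorted2 xs (fun pol => if pvIsCo pol then (0 : Int) else 1) (fun pol => pol)
      = xs.foldl (fun acc x => PySem.List.insertBy pvLtB x acc) [] := rfl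
  have hb : ∀ l : List String, PySem.List.sorted l (fun x => x)
      = l.foldl (fun acc x => PySem.List.insertBy pvStrB x acc) [] := fun _ => rfl
  rw [ha, hb, hb]
  exact fold_split xs [] [] (by simp) (by simp)

-- A's partition loop over any list, with arbitrary starting accumulators
lemma part_fold : ∀ (l a b : List String),
    l.foldl (fun acc pol => if pvIsCo pol then (acc.1 ++ [pol], acc.2) else (acc.1, acc.2 ++ [pol])) (a, b)
      = (a ++ l.filter pvIsCo, b ++ l.filter (fun x => !pvIsCo x)) := by
  intro l
  induction l with
  | nil => intro a b; simp
  | cons x l ih =>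
    intro a b
    by_cases hx : pvIsCo x = true
    · simp [hx, ih, List.append_assoc]
    · simp only [Bool.not_eq_true] at hx
      simp [hx, ih, List.append_assoc]

lemma mem_sorted_filter_co {y : String} {xs : List String}
    (h : y ∈ PySem.List.sorted (xs.filter pvIsCo) (fun x => x)) : pvIsCo y = true := by
  have := (PySem.List.mem_sorted _ _ _ _).mp h
  exact (List.mem_filter.mp this).2

lemma mem_sorted_filter_cross {y : String} {xs : List String}
    (h : y ∈ PySem.List.sorted (xs.filter (fun x => !pvIsCo x)) (fun x => x)) : pvIsCo y = false := by
  have := (PySem.List.mem_sorted _ _ _ _).mp h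
  simpa using (List.mem_filter.mp this).2

-- ===== VERDICT (by name: the statement is the Claim_ definition above) =====
theorem check_polarizations_spec : Claim_equal_check_polarizations := by
  intro pol_list _
  unfold Spec_check_polarizations check_polarizations check_polarizations_alt
  dsimp only
  rw [sorted2_eq_split]
  set co := PySem.List.sorted (pol_list.filter pvIsCo) (fun x => x) with hco
  set cross := PySem.List.sorted (pol_list.filter (fun x => !pvIsCo x)) (fun x => x) with hcross
  rw [part_fold]
  have h1 : (co ++ cross).filter pvIsCo = co := by
    rw [List.filter_append]
    rw [List.filter_eq_self.mpr (fun y hy => mem_sorted_filter_co (hco ▸ hy)),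
      List.filter_eq_nil_iff.mpr (fun y hy => by
        simp [mem_sorted_filter_cross (hcross ▸ hy)]), List.append_nil]
  have h2 : (co ++ cross).filter (fun x => !pvIsCo x) = cross := by
    rw [List.filter_append]
    rw [List.filter_eq_nil_iff.mpr (fun y hy => by
        simp [mem_sorted_filter_co (hco ▸ hy)]),
      List.filter_eq_self.mpr (fun y hy => by
        simp [mem_sorted_filter_cross (hcross ▸ hy)]), List.nil_append]
  simp [h1, h2]
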